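-- pv_equiv track=rewrite | github.com/briangalindoherbert/gs_tweet | coverage_patterns.py | identify_conversations
-- ===== SOURCE A (Python) =====
-- def identify_conversations(twd, qtid: set, rpid: set, rtid: set):
--     """
--     identify conversation IDs and how many associated Tweets for each
--     :param twd: dict of dict for Tweet dataset
--     :param qtid: set of quote tweet originating IDs
--     :param rpid: set of originating IDs for replies
--     :param rtid: set of originating IDs for retweets
--     :return:
--     """
--     conv: list = [x['conversation'] for x in twd.values() if 'conversation' in x]
--     conv: set = set(conv)
--
--     conv_N_qt: set = conv.intersection(qtid)
--     conv_N_rp: set = conv.intersection(rpid)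
--     conv_N_rt: set = conv.intersection(rtid)
--     qtrtrp_conv: set = conv_N_qt.union(conv_N_rp).union(conv_N_rt)
--     conv_noid: set = qtrtrp_conv.difference(set(twd.keys()))
--
--     return set(sorted(conv_noid))
-- ===== SOURCE B (Python) =====
-- def identify_conversations(twd, qtid: set, rpid: set, rtid: set):
--     """Sort-and-merge instead of set algebra: sort the candidate conversation
--     ids (those not already keys of twd) and the combined origin ids, then a
--     two-pointer merge emits their common elements in one linear scan."""
--     conv = sorted({x['conversation'] for x in twd.values()
--                    if 'conversation' in x and x['conversation'] not in twd})
--     ids = sorted(set(qtid) | set(rpid) | set(rtid))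
--     out = []
--     i = j = 0
--     while i < len(conv) and j < len(ids):
--         if conv[i] < ids[j]:
--             i += 1
--         elif ids[j] < conv[i]:
--             j += 1
--         else:
--             out.append(conv[i])
--             i += 1
--             j += 1
--     return set(out)
-- ===== Notes on version B (the rewrite author's own statement) =====
-- stated objective: alternative
-- what changed: A computes three hash-set intersections, two unions and a difference against the key set; B sorts the candidate conversation ids and the combined origin ids and finds their common elements with a two-pointer merge scan.
import Mathlib
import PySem

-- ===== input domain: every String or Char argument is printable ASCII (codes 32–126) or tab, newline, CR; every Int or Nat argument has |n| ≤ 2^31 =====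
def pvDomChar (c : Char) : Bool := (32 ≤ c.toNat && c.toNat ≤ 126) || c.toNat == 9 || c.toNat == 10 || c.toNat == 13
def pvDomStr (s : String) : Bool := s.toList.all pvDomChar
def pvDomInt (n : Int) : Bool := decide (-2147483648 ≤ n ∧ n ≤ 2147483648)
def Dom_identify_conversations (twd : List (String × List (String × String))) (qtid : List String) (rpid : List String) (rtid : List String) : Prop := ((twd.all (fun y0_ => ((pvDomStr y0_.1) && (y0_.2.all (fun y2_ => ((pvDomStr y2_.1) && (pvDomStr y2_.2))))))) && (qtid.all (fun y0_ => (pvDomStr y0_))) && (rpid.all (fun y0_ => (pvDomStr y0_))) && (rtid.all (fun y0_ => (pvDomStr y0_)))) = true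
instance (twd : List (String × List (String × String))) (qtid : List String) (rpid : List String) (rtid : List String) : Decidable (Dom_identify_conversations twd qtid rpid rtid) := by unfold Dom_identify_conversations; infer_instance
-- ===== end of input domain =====

-- B replaces A's intersection/union/difference set algebra with sort-then-merge: both candidate lists are sorted and a two-pointer merge emits the common ids; equal outputs proved.


-- ===== PORT A =====
def identify_conversations (twd : List (String × List (String × String))) (qtid : List String) (rpid : List String) (rtid : List String) : List String :=
  let d : PySem.Dict String (List (String × String)) := PySem.Dict.ofList twd
  let conv : List String := d.values.filterMap (fun x =>
    let xd : PySem.Dict String String := PySem.Dict.ofList x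
    if xd.contains "conversation" then xd.get? "conversation" else none)
  let convS : PySem.Set String := PySem.Set.ofList conv
  let conv_N_qt : PySem.Set String := PySem.Set.inter convS qtid
  let conv_N_rp : PySem.Set String := PySem.Set.inter convS rpid
  let conv_N_rt : PySem.Set String := PySem.Set.inter convS rtid
  let qtrtrp_conv : PySem.Set String := PySem.Set.union (PySem.Set.union conv_N_qt conv_N_rp) conv_N_rt
  let conv_noid : PySem.Set String := PySem.Set.diff qtrtrp_conv (PySem.Set.ofList d.keys)
  PySem.Set.ofList (PySem.List.sorted conv_noid (fun s => s) false)

-- ===== PORT B =====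
-- two-pointer merge of two sorted lists, emitting the common elements
def icMerge : List String → List String → List String
  | [], _ => []
  | _ :: _, [] => []
  | a :: as, b :: bs =>
    if a < b then icMerge as (b :: bs)
    else if b < a then icMerge (a :: as) bs
    else a :: icMerge as bs
termination_by conv ids => conv.length + ids.length

def identify_conversations_alt (twd : List (String × List (String × String))) (qtid : List String) (rpid : List String) (rtid : List String) : List String :=
  let d : PySem.Dict String (List (String × String)) := PySem.Dict.ofList twd
  let conv : List String := PySem.List.sorted (PySem.Set.ofList (d.values.filterMap (fun x =>
    let xd : PySem.Dict String String := PySem.Dict.ofList x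
    match xd.get? "conversation" with
    | some c => if d.contains c then none else some c
    | none => none))) (fun s => s) false
  let ids : List String := PySem.List.sorted (PySem.Set.union (PySem.Set.union (PySem.Set.ofList qtid) rpid) rtid) (fun s => s) false
  PySem.Set.ofList (icMerge conv ids)

-- ===== PRECONDITION & SPEC =====
def Spec_identify_conversations (twd : List (String × List (String × String))) (qtid : List String) (rpid : List String) (rtid : List String) (out : List String) : Prop := out = identify_conversations_alt twd qtid rpid rtid
instance (twd : List (String × List (String × String))) (qtid : List String) (rpid : List String) (rtid : List String) (out : List String) : Decidable (Spec_identify_conversations twd qtid rpid rtid out) := by unfold Spec_identify_conversations; infer_instance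

-- ===== CLAIM (what is proved, stated in full; the proofs are below) =====
def Claim_equal_identify_conversations : Prop := ∀ (twd : List (String × List (String × String))) (qtid : List String) (rpid : List String) (rtid : List String), Dom_identify_conversations twd qtid rpid rtid → Spec_identify_conversations twd qtid rpid rtid (identify_conversations twd qtid rpid rtid)

-- ===== LEMMAS AND PROOFS =====


-- membership in the merge of two lists
theorem mem_icMerge (xs ys : List String) (hx : xs.Pairwise (· < ·)) (hy : ys.Pairwise (· < ·)) (z : String) :
    z ∈ icMerge xs ys ↔ z ∈ xs ∧ z ∈ ys := by
  induction xs generalizing ys with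
  | nil => simp [icMerge]
  | cons a as ihx =>
    induction ys with
    | nil => simp [icMerge]
    | cons b bs ihy =>
      have hx' := (List.pairwise_cons.1 hx).2
      have hxh := (List.pairwise_cons.1 hx).1
      have hy' := (List.pairwise_cons.1 hy).2
      have hyh := (List.pairwise_cons.1 hy).1
      by_cases hab : a < b
      · rw [show icMerge (a :: as) (b :: bs) = icMerge as (b :: bs) by rw [icMerge]; simp [hab]]
        rw [ihx (b :: bs) hx' hy]
        constructor
        · rintro ⟨h1, h2⟩; exact ⟨List.mem_cons_of_mem a h1, h2⟩
        · rintro ⟨h1, h2⟩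
          rcases List.mem_cons.1 h1 with rfl | h1
          · -- z = a, but z ∈ b :: bs forces b ≤ z, contradiction with a < b
            rcases List.mem_cons.1 h2 with rfl | h2
            · exact absurd hab (lt_irrefl z)
            · exact absurd (hab.trans (hyh z h2)) (lt_irrefl z)
          · exact ⟨h1, h2⟩
      · by_cases hba : b < a
        · rw [show icMerge (a :: as) (b :: bs) = icMerge (a :: as) bs by rw [icMerge]; simp [hab, hba]]
          rw [ihy hy']
          constructor
          · rintro ⟨h1, h2⟩; exact ⟨h1, List.mem_cons_of_mem b h2⟩
          · rintro ⟨h1, h2⟩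
            rcases List.mem_cons.1 h2 with rfl | h2
            · rcases List.mem_cons.1 h1 with rfl | h1
              · exact absurd hba (lt_irrefl z)
              · exact absurd (hba.trans (hxh z h1)) (lt_irrefl z)
            · exact ⟨h1, h2⟩
        · have hab' : a = b := le_antisymm (not_lt.1 hba) (not_lt.1 hab)
          subst hab'
          rw [show icMerge (a :: as) (a :: bs) = a :: icMerge as bs by rw [icMerge]; simp]
          rw [List.mem_cons, ihx bs hx' hy']
          constructor
          · rintro (rfl | ⟨h1, h2⟩)
            · exact ⟨List.mem_cons_self, List.mem_cons_self⟩
            · exact ⟨List.mem_cons_of_mem a h1, List.mem_cons_of_mem a h2⟩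
          · rintro ⟨h1, h2⟩
            rcases List.mem_cons.1 h1 with rfl | h1
            · exact Or.inl rfl
            · rcases List.mem_cons.1 h2 with rfl | h2
              · exact Or.inl rfl
              · exact Or.inr ⟨h1, h2⟩

-- the merge is a sublist of its left input
theorem icMerge_sublist (xs ys : List String) : (icMerge xs ys).Sublist xs := by
  induction xs generalizing ys with
  | nil => simp [icMerge]
  | cons a as ihx =>
    induction ys with
    | nil => simp [icMerge]
    | cons b bs ihy =>
      by_cases hab : a < b
      · rw [show icMerge (a :: as) (b :: bs) = icMerge as (b :: bs) by rw [icMerge]; simp [hab]]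
        exact (ihx (b :: bs)).trans (List.sublist_cons_self a as)
      · by_cases hba : b < a
        · rw [show icMerge (a :: as) (b :: bs) = icMerge (a :: as) bs by rw [icMerge]; simp [hab, hba]]
          exact ihy
        · rw [show icMerge (a :: as) (b :: bs) = a :: icMerge as bs by rw [icMerge]; simp [hab, hba]]
          exact (ihx bs).cons₂ a

-- the merge of two strictly increasing lists is strictly increasing
theorem pairwise_icMerge (xs ys : List String) (hx : xs.Pairwise (· < ·)) (_hy : ys.Pairwise (· < ·)) :
    (icMerge xs ys).Pairwise (· < ·) := by
  exact hx.sublist (icMerge_sublist xs ys)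

-- set() of a duplicate-free list is the list itself
theorem foldl_add_nodup_disj (xs acc : List String) (h : xs.Nodup) (hd : ∀ z ∈ xs, z ∉ acc) :
    xs.foldl PySem.Set.add acc = acc ++ xs := by
  induction xs generalizing acc with
  | nil => simp
  | cons x t ih =>
    have hx : x ∉ acc := hd x List.mem_cons_self
    rw [List.foldl_cons, PySem.Set.add_of_not_mem hx, ih (acc ++ [x]) (List.nodup_cons.1 h).2]
    · simp
    · intro z hz hmem
      rcases List.mem_append.1 hmem with hmem | hmem
      · exact hd z (List.mem_cons_of_mem x hz) hmem
      · rw [List.mem_singleton.1 hmem] at hz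
        exact (List.nodup_cons.1 h).1 hz

theorem setOfList_nodup_id (xs : List String) (h : xs.Nodup) : PySem.Set.ofList xs = xs := by
  rw [PySem.Set.ofList_eq_foldl, foldl_add_nodup_disj xs [] h (by simp)]
  simp

-- a nodup sorted list is strictly increasing
theorem sorted_nodup_pairwise_lt (xs : List String) (h : xs.Nodup) :
    (PySem.List.sorted xs (fun s => s) false).Pairwise (· < ·) := by
  have hnd : (PySem.List.sorted xs (fun s => s) false).Nodup :=
    ((PySem.List.sorted_perm xs (fun s => s) false).nodup_iff).2 h
  have hle := PySem.List.sorted_pairwise xs (fun s => s)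
  exact (hle.and hnd).imp (fun hab => lt_of_le_of_ne hab.1 hab.2)

-- the guarded lookup A's comprehension performs is the plain lookup
theorem if_mem_keys_get? (xd : PySem.Dict String String) (k : String) (y : String) :
    ((if xd.contains k = true then xd.get? k else none) = some y) ↔ xd.get? k = some y := by
  cases hc : xd.contains k
  · rw [if_neg (by simp), (PySem.Dict.get?_eq_none_iff_contains xd k).2 hc]
  · rw [if_pos rfl]

-- B's filterMap step hits z exactly when the tweet's conversation is z and z is not a key
theorem b_pred_some (d : PySem.Dict String (List (String × String))) (x : List (String × String)) (z : String) :
    ((match (PySem.Dict.ofList x : PySem.Dict String String).get? "conversation" with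
      | some c => if d.contains c then none else some c
      | none => none) = some z)
    ↔ ((PySem.Dict.ofList x : PySem.Dict String String).get? "conversation" = some z ∧ d.contains z = false) := by
  cases h : (PySem.Dict.ofList x : PySem.Dict String String).get? "conversation" with
  | none => simp
  | some c =>
    by_cases hc : d.contains c = true
    · simp only [hc, if_true]
      constructor
      · intro h'; exact absurd h' (by simp)
      · rintro ⟨hz, hcz⟩
        rw [Option.some.inj hz] at hc
        rw [hc] at hcz
        exact absurd hcz (by simp)
    · rw [Bool.not_eq_true] at hc
      simp only [hc, Bool.false_eq_true, if_false]
      constructor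
      · intro h'; exact ⟨h', (Option.some.inj h') ▸ hc⟩
      · rintro ⟨hz, _⟩; exact hz

theorem main_eq (twd : List (String × List (String × String))) (qtid : List String) (rpid : List String) (rtid : List String) :
    identify_conversations twd qtid rpid rtid = identify_conversations_alt twd qtid rpid rtid := by
  unfold identify_conversations identify_conversations_alt
  simp only []
  -- abbreviations
  generalize hdd : PySem.Dict.ofList twd = d
  -- A's final set before sorting
  have hnoid : (PySem.Set.diff
      (PySem.Set.union (PySem.Set.union
        (PySem.Set.inter (PySem.Set.ofList (d.values.filterMap (fun x =>
          let xd : PySem.Dict String String := PySem.Dict.ofList x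
          if xd.contains "conversation" then xd.get? "conversation" else none))) qtid)
        (PySem.Set.inter (PySem.Set.ofList (d.values.filterMap (fun x =>
          let xd : PySem.Dict String String := PySem.Dict.ofList x
          if xd.contains "conversation" then xd.get? "conversation" else none))) rpid))
        (PySem.Set.inter (PySem.Set.ofList (d.values.filterMap (fun x =>
          let xd : PySem.Dict String String := PySem.Dict.ofList x
          if xd.contains "conversation" then xd.get? "conversation" else none))) rtid))
      (PySem.Set.ofList d.keys)).Nodup :=
    PySem.Set.nodup_diff _ _ (PySem.Set.nodup_union _ _ (PySem.Set.nodup_union _ _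
      (PySem.Set.nodup_inter _ _ (PySem.Set.nodup_ofList _))))
  have hApw := sorted_nodup_pairwise_lt _ hnoid
  -- B's two sorted inputs are strictly increasing
  have hcpw : (PySem.List.sorted (PySem.Set.ofList (d.values.filterMap (fun x =>
      let xd : PySem.Dict String String := PySem.Dict.ofList x
      match xd.get? "conversation" with
      | some c => if d.contains c then none else some c
      | none => none))) (fun s => s) false).Pairwise (· < ·) :=
    PySem.List.sorted_ofList_pairwise_lt _
  have hipw : (PySem.List.sorted (PySem.Set.union (PySem.Set.union (PySem.Set.ofList qtid) rpid) rtid)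
      (fun s => s) false).Pairwise (· < ·) :=
    sorted_nodup_pairwise_lt _ (PySem.Set.nodup_union _ _ (PySem.Set.nodup_union _ _ (PySem.Set.nodup_ofList _)))
  have hmpw := pairwise_icMerge _ _ hcpw hipw
  rw [setOfList_nodup_id _ (hApw.imp (fun hab => ne_of_lt hab)),
      setOfList_nodup_id _ (hmpw.imp (fun hab => ne_of_lt hab))]
  refine PySem.List.sorted_eq_of_perm_of_pairwise_lt _ _ _ ?_ hmpw
  refine (List.perm_ext_iff_of_nodup (hmpw.imp (fun hab => ne_of_lt hab)) hnoid).2 ?_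
  intro z
  rw [mem_icMerge _ _ hcpw hipw]
  simp only [PySem.List.mem_sorted, PySem.Set.mem_ofList, PySem.Set.mem_union, PySem.Set.mem_inter,
    PySem.Set.mem_diff, List.mem_filterMap, b_pred_some, if_mem_keys_get?]
  have hkey : (d.contains z = false) ↔ z ∉ PySem.Dict.keys d := by
    rw [← PySem.Dict.contains_iff_mem_keys]
    constructor
    · intro h hc; rw [h] at hc; exact absurd hc (by simp)
    · intro h; cases hc : d.contains z
      · rfl
      · exact absurd hc h
  constructor
  · rintro ⟨⟨x, hxv, hgz, hcz⟩, hm⟩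
    refine ⟨?_, hkey.1 hcz⟩
    rcases hm with (hm | hm) | hm
    · exact Or.inl (Or.inl ⟨⟨x, hxv, hgz⟩, hm⟩)
    · exact Or.inl (Or.inr ⟨⟨x, hxv, hgz⟩, hm⟩)
    · exact Or.inr ⟨⟨x, hxv, hgz⟩, hm⟩
  · rintro ⟨hin, hk⟩
    have hcz := hkey.2 hk
    rcases hin with (⟨⟨x, hxv, hgz⟩, hm⟩ | ⟨⟨x, hxv, hgz⟩, hm⟩) | ⟨⟨x, hxv, hgz⟩, hm⟩ <;>
      exact ⟨⟨x, hxv, hgz, hcz⟩, by tauto⟩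

-- ===== VERDICT (by name: the statement is the Claim_ definition above) =====
theorem identify_conversations_spec : Claim_equal_identify_conversations := by
  intro twd qtid rpid rtid _
  exact main_eq twd qtid rpid rtid
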